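-- pv_equiv track=rewrite | github.com/captainLevi17/freeCodeCamp_python_daily | anniversary_milestone.py | get_milestone
-- ===== SOURCE A (Python) =====
-- def get_milestone(years):
--     milestones = {
--         1: "Paper",
--         5: "Wood",
--         10: "Tin",
--         25: "Silver",
--         40: "Ruby",
--         50: "Gold",
--         60: "Diamond",
--         70: "Platinum"
--     }
--     if years < 1:
--         return "Newlyweds"
--     for milestone_year in sorted(milestones.keys(), reverse=True):
--         if years >= milestone_year:
--             return milestones[milestone_year]
-- ===== SOURCE B (Python) =====
-- def get_milestone(years):
--     thresholds = [1, 5, 10, 25, 40, 50, 60, 70]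
--     names = ["Newlyweds", "Paper", "Wood", "Tin", "Silver", "Ruby", "Gold", "Diamond", "Platinum"]
--     lo, hi = 0, len(thresholds)
--     while lo < hi:
--         mid = (lo + hi) // 2
--         if years < thresholds[mid]:
--             hi = mid
--         else:
--             lo = mid + 1
--     return names[lo]
-- ===== Notes on version B (the rewrite author's own statement) =====
-- stated objective: alternative
-- what changed: Replaces the dict plus descending linear scan over sorted keys with a binary search (hand-written bisect_right) over an ascending threshold list indexing into a parallel name list that includes 'Newlyweds' at index 0.
import Mathlib
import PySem

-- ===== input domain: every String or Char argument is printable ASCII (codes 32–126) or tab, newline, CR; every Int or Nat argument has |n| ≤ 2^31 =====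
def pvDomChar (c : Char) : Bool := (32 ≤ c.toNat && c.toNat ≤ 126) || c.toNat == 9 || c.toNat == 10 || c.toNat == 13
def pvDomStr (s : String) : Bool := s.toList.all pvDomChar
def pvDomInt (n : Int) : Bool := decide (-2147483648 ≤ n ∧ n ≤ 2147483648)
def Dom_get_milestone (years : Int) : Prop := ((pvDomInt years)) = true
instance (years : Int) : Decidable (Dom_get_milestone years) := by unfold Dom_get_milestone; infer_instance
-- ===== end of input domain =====

-- B replaces A's descending linear scan over sorted dict keys with a binary search (bisect_right)
-- over an ascending threshold list and a parallel name list; objective: alternative algorithm.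

-- ===== PORT A =====
-- the dict literal of A
def pvMilestonesA : PySem.Dict Int String :=
  PySem.Dict.ofList [(1, "Paper"), (5, "Wood"), (10, "Tin"), (25, "Silver"),
                     (40, "Ruby"), (50, "Gold"), (60, "Diamond"), (70, "Platinum")]

-- the for-loop: first key (descending order) with years >= key returns its dict value;
-- Python falls off the loop returning None only when no key matches (unreachable for years >= 1),
-- modelled by Option and a final .getD "" in get_milestone.
def pvScanA (years : Int) (d : PySem.Dict Int String) : List Int → Option String
  | [] => none
  | k :: ks => if years ≥ k then d.get? k else pvScanA years d ks

def get_milestone (years : Int) : String :=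
  let milestones := pvMilestonesA
  if years < 1 then "Newlyweds"
  else (pvScanA years milestones (PySem.List.sorted milestones.keys (fun x => x) true)).getD ""

-- ===== PORT B =====
def pvThresholdsB : List Int := [1, 5, 10, 25, 40, 50, 60, 70]
def pvNamesB : List String :=
  ["Newlyweds", "Paper", "Wood", "Tin", "Silver", "Ruby", "Gold", "Diamond", "Platinum"]

-- the hand-written bisect_right while-loop of Source B
def pvBisectB (years : Int) (lo hi : Nat) : Nat :=
  if _h : lo < hi then
    let mid := (lo + hi) / 2
    if years < pvThresholdsB.getD mid 0 then pvBisectB years lo mid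
    else pvBisectB years (mid + 1) hi
  else lo
termination_by hi - lo
decreasing_by all_goals omega

def get_milestone_alt (years : Int) : String :=
  pvNamesB.getD (pvBisectB years 0 pvThresholdsB.length) ""

-- ===== PRECONDITION & SPEC =====
def Spec_get_milestone (years : Int) (out : String) : Prop := out = get_milestone_alt years
instance (years : Int) (out : String) : Decidable (Spec_get_milestone years out) := by unfold Spec_get_milestone; infer_instance

-- ===== CLAIM (what is proved, stated in full; the proofs are below) =====
def Claim_equal_get_milestone : Prop := ∀ (years : Int), Dom_get_milestone years → Spec_get_milestone years (get_milestone years)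

-- ===== LEMMAS AND PROOFS =====

-- the descending key order A iterates over, named so both sides reduce on a case split
theorem pvSortedKeysA :
    PySem.List.sorted pvMilestonesA.keys (fun x => x) true = [70, 60, 50, 40, 25, 10, 5, 1] := by
  decide

-- ===== VERDICT (by name: the statement is the Claim_ definition above) =====
set_option maxRecDepth 8000 in
set_option maxHeartbeats 2000000 in
theorem get_milestone_spec : Claim_equal_get_milestone := by
  intro years _
  unfold Spec_get_milestone get_milestone get_milestone_alt
  simp only [pvSortedKeysA]
  by_cases h1 : years < 1 <;> by_cases h5 : years < 5 <;> by_cases h10 : years < 10 <;>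
    by_cases h25 : years < 25 <;> by_cases h40 : years < 40 <;> by_cases h50 : years < 50 <;>
    by_cases h60 : years < 60 <;> by_cases h70 : years < 70 <;>
  first
  | omega
  | (simp [pvScanA, pvBisectB, pvThresholdsB, pvNamesB,
           h1, h5, h10, h25, h40, h50, h60, h70]
     try (split_ifs <;> first | omega | rfl))
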